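-- pv_equiv track=rewrite | github.com/dbikard/dgrec | dgrec/utils.py | mut_rix
-- ===== SOURCE A (Python) =====
-- def mut_rix(mutations):
--     """Reindexes the positions of the mutations to go from
--     their position in the sequence alignment to their position in the original sequence."""
--     ph=0
--     res_rix=[]
--     for mut in mutations:
--         rix=mut[1]+ph
--         res_rix.append((mut[0],rix,mut[2]))
--         if mut[0]=='-':
--             ph-=1
--
--     return res_rix
-- ===== SOURCE B (Python) =====
-- def mut_rix(mutations):
--     """Reindexes mutation positions from alignment coordinates to original-sequence
--     coordinates, via a precomputed prefix table of gap counts."""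
--     offsets = [0]
--     for m in mutations:
--         offsets.append(offsets[-1] + (m[0] == '-'))
--     return [(m[0], m[1] - off, m[2]) for m, off in zip(mutations, offsets)]
-- ===== Notes on version B (the rewrite author's own statement) =====
-- stated objective: alternative
-- what changed: Replaces A's single pass with an inline running offset by two distinct passes: first a prefix table of cumulative gap ('-') counts, then a zip/comprehension that subtracts each element's precomputed offset.
import Mathlib
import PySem

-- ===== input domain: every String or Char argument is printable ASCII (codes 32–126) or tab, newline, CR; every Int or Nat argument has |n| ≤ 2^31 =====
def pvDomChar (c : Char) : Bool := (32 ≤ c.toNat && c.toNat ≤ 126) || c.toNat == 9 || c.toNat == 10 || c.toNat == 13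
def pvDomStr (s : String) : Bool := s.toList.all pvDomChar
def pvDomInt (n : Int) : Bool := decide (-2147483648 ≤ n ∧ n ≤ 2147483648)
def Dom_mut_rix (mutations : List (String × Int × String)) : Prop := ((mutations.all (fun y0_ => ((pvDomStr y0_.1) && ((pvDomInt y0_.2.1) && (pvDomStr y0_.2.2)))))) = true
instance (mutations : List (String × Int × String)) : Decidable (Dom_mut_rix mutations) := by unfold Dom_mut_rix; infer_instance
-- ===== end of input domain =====

-- B replaces A's inline running-offset loop by two distinct passes (a prefix table of
-- cumulative gap counts, then a zip that subtracts each offset); same O(n) cost.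

-- ===== PORT A =====
-- A: one loop carrying (ph, res_rix); append uses the current ph, then ph is
-- decremented when the mutation's first component is '-'.
def mut_rix (mutations : List (String × Int × String)) : List (String × Int × String) :=
  (mutations.foldl
    (fun (st : Int × List (String × Int × String)) mu =>
      let rix := mu.2.1 + st.1
      let res := st.2 ++ [(mu.1, rix, mu.2.2)]
      (if mu.1 = "-" then st.1 - 1 else st.1, res))
    (0, [])).2

-- ===== PORT B =====
-- B: first build the prefix table 'offsets' (offsets[i] = number of '-' strictly
-- before index i), then one map over the zip, subtracting the offset.
def mut_rix_alt (mutations : List (String × Int × String)) : List (String × Int × String) :=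
  let offsets : List Int :=
    mutations.foldl
      (fun (o : List Int) m => o ++ [o.getLast! + (if m.1 = "-" then 1 else 0)])
      [0]
  (mutations.zip offsets).map (fun p => (p.1.1, p.1.2.1 - p.2, p.1.2.2))

-- ===== PRECONDITION & SPEC =====
def Spec_mut_rix (mutations : List (String × Int × String)) (out : List (String × Int × String)) : Prop := out = mut_rix_alt mutations
instance (mutations : List (String × Int × String)) (out : List (String × Int × String)) : Decidable (Spec_mut_rix mutations out) := by unfold Spec_mut_rix; infer_instance

-- ===== CLAIM (what is proved, stated in full; the proofs are below) =====
def Claim_equal_mut_rix : Prop := ∀ (mutations : List (String × Int × String)), Dom_mut_rix mutations → Spec_mut_rix mutations (mut_rix mutations)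

-- ===== LEMMAS AND PROOFS =====

-- Reference form: shift each position by ph, decreasing ph by 1 after each '-'.
def pvShift : List (String × Int × String) → Int → List (String × Int × String)
  | [], _ => []
  | m :: t, ph => (m.1, m.2.1 + ph, m.2.2) :: pvShift t (ph - (if m.1 = "-" then 1 else 0))

-- Cumulative '-' counts strictly after the start, from running count c.
def pvCounts : List (String × Int × String) → Int → List Int
  | [], _ => []
  | m :: t, c =>
    let c' := c + (if m.1 = "-" then 1 else 0)
    c' :: pvCounts t c'

theorem pvA_foldl (ms : List (String × Int × String)) :
    ∀ (ph : Int) (acc : List (String × Int × String)),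
    (ms.foldl
      (fun (st : Int × List (String × Int × String)) mu =>
        let rix := mu.2.1 + st.1
        let res := st.2 ++ [(mu.1, rix, mu.2.2)]
        (if mu.1 = "-" then st.1 - 1 else st.1, res))
      (ph, acc)).2 = acc ++ pvShift ms ph := by
  induction ms with
  | nil => intro ph acc; simp [pvShift]
  | cons m t ih =>
    intro ph acc
    simp only [List.foldl_cons, pvShift]
    rw [ih]
    by_cases h : m.1 = "-" <;> simp [h, List.append_assoc]

theorem pvB_offsets (ms : List (String × Int × String)) :
    ∀ (init : List Int) (c : Int),
    ms.foldl
      (fun (o : List Int) m => o ++ [o.getLast! + (if m.1 = "-" then 1 else 0)])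
      (init ++ [c]) = init ++ [c] ++ pvCounts ms c := by
  induction ms with
  | nil => intro init c; simp [pvCounts]
  | cons m t ih =>
    intro init c
    simp only [List.foldl_cons, pvCounts]
    have hl : (init ++ [c]).getLast! = c := by simp
    rw [hl, ih (init ++ [c]) (c + (if m.1 = "-" then 1 else 0))]
    simp [List.append_assoc]

theorem pvB_zip (ms : List (String × Int × String)) :
    ∀ (c : Int),
    (ms.zip (c :: pvCounts ms c)).map (fun p => (p.1.1, p.1.2.1 - p.2, p.1.2.2))
      = pvShift ms (-c) := by
  induction ms with
  | nil => intro c; simp [pvShift]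
  | cons m t ih =>
    intro c
    simp only [pvCounts, pvShift, List.zip_cons_cons, List.map_cons]
    rw [ih (c + (if m.1 = "-" then 1 else 0))]
    have h1 : -(c + (if m.1 = "-" then 1 else 0)) = -c - (if m.1 = "-" then 1 else 0) := by ring
    rw [h1, sub_eq_add_neg m.2.1 c]

-- ===== VERDICT (by name: the statement is the Claim_ definition above) =====
theorem mut_rix_spec : Claim_equal_mut_rix := by
  intro ms _
  show mut_rix ms = mut_rix_alt ms
  simp only [mut_rix, mut_rix_alt]
  rw [pvA_foldl ms 0 [], show ([0] : List Int) = [] ++ [0] from rfl, pvB_offsets ms [] 0]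
  simp only [List.nil_append, List.singleton_append]
  rw [pvB_zip ms 0]
  norm_num
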